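-- pv_equiv track=rewrite | github.com/RocioLobo/curso_python | funciones/lecture.py | get_words_with_all_vowels
-- ===== SOURCE A (Python) =====
-- def get_words_with_all_vowels(text: str) -> list[str]:
--     VOWELS = 'aeiou'
--     def get_unique_vowels(word: str) -> set[str]:
--         return set(c for c in word if c in VOWELS)
--     result = []
--     for word in text.split():
--         if len(get_unique_vowels(word)) == len(VOWELS):
--             result.append(word)
--     return result
-- ===== SOURCE B (Python) =====
-- def get_words_with_all_vowels(text: str) -> list[str]:
--     # Single pass over the characters: a hand-rolled word splitter that keeps a
--     # bitmask of the vowels seen in the current word; a word is emitted at its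
--     # boundary iff the mask is full (31). No split(), no per-word set.
--     BIT = {'a': 1, 'e': 2, 'i': 4, 'o': 8, 'u': 16}
--     ALL = 31
--     result = []
--     chars = []
--     mask = 0
--     for ch in text:
--         if ch.isspace():
--             if mask == ALL:
--                 result.append(''.join(chars))
--             chars = []
--             mask = 0
--         else:
--             chars.append(ch)
--             mask |= BIT.get(ch, 0)
--     if mask == ALL:
--         result.append(''.join(chars))
--     return result
-- ===== Notes on version B (the rewrite author's own statement) =====
-- stated objective: alternative
-- what changed: Replaces split()-then-filter (A builds, per word, a set of its distinct vowels and compares its size to 5) with a single character-level state machine: one pass over the text that splits words by hand while OR-ing a 5-bit vowel mask, emitting a word at its boundary iff the mask is 31; no split(), no set, no per-word second scan.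
import Mathlib
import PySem

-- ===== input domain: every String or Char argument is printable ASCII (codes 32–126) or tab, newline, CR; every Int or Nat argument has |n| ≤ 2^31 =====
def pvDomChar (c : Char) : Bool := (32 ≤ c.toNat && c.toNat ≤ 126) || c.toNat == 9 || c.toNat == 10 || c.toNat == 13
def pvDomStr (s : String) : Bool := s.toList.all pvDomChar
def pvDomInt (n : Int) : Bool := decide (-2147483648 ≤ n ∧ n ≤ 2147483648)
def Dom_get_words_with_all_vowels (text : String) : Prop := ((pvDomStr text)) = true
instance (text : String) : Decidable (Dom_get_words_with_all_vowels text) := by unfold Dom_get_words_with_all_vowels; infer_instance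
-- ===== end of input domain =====

-- B replaces A's split()-then-filter (per word: build the set of its distinct vowels,
-- compare its size to 5) by a single character-level state machine that splits words
-- by hand while OR-ing a 5-bit vowel mask; objective: alternative algorithm, same cost.

-- ===== PORT A =====
-- A's inner helper get_unique_vowels: set(c for c in word if c in VOWELS).
-- ('c in VOWELS' on a 1-char string equals character membership — exact.)
def pvA_unique_vowels (word : String) : PySem.Set Char :=
  PySem.Set.ofList (word.toList.filter (fun c => "aeiou".toList.contains c))

def get_words_with_all_vowels (text : String) : List String :=
  (PySem.Str.split₀ text).foldl
    (fun result word =>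
      if PySem.Set.len (pvA_unique_vowels word) = PySem.Str.len "aeiou"
      then result ++ [word] else result) []

-- ===== PORT B =====
-- B's BIT dict
def pvBit : PySem.Dict Char Int :=
  PySem.Dict.mk [('a', 1), ('e', 2), ('i', 4), ('o', 8), ('u', 16)]

-- the loop body: state = (result, chars of the current word, vowel mask);
-- ch.isspace() → PySem.Chars.isspace, BIT.get(ch, 0) → pvBit.getD ch 0
def pvBStep (st : List String × List Char × Int) (ch : Char) :
    List String × List Char × Int :=
  if PySem.Chars.isspace ch then
    ((if st.2.2 = 31 then st.1 ++ [String.ofList st.2.1] else st.1), [], 0)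
  else
    (st.1, st.2.1 ++ [ch], PySem.Int.bor st.2.2 (pvBit.getD ch 0))

-- the final flush after the loop ( ''.join(chars) ported as String.ofList — exact)
def pvBFin (st : List String × List Char × Int) : List String :=
  if st.2.2 = 31 then st.1 ++ [String.ofList st.2.1] else st.1

def get_words_with_all_vowels_alt (text : String) : List String :=
  pvBFin (text.toList.foldl pvBStep ([], [], 0))

-- ===== PRECONDITION & SPEC =====
def Spec_get_words_with_all_vowels (text : String) (out : List String) : Prop := out = get_words_with_all_vowels_alt text
instance (text : String) (out : List String) : Decidable (Spec_get_words_with_all_vowels text out) := by unfold Spec_get_words_with_all_vowels; infer_instance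

-- ===== CLAIM =====
def Claim_equal_get_words_with_all_vowels : Prop := ∀ (text : String), Dom_get_words_with_all_vowels text → Spec_get_words_with_all_vowels text (get_words_with_all_vowels text)

-- ===== LEMMAS AND PROOFS =====

-- Nat shadow of B's vowel bits, used only by the proofs
def pvNBit (c : Char) : Nat :=
  if c = 'a' then 1 else if c = 'e' then 2 else if c = 'i' then 4
  else if c = 'o' then 8 else if c = 'u' then 16 else 0

def pvNMask (w : List Char) : Nat := w.foldl (fun m c => m ||| pvNBit c) 0

-- the vowel mask B accumulates over the chars of the current word
def pvMaskOf (w : List Char) : Int :=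
  w.foldl (fun m c => PySem.Int.bor m (pvBit.getD c 0)) 0

theorem pvBit_getD (c : Char) : pvBit.getD c 0 = (pvNBit c : Int) := by
  by_cases h1 : c = 'a' <;> by_cases h2 : c = 'e' <;> by_cases h3 : c = 'i' <;>
    by_cases h4 : c = 'o' <;> by_cases h5 : c = 'u' <;>
    simp [pvBit, pvNBit, PySem.Dict.getD_eq_get?_getD, PySem.Dict.get?_mk_cons,
      h1, h2, h3, h4, h5] <;>
    simp_all [eq_comm] <;> rfl

theorem pvMaskOf_append (w : List Char) (c : Char) :
    pvMaskOf (w ++ [c]) = PySem.Int.bor (pvMaskOf w) (pvBit.getD c 0) := by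
  simp [pvMaskOf, List.foldl_append]

theorem pvNMask_append (w : List Char) (c : Char) :
    pvNMask (w ++ [c]) = pvNMask w ||| pvNBit c := by
  simp [pvNMask, List.foldl_append]

theorem pvMaskOf_eq_cast (w : List Char) : pvMaskOf w = (pvNMask w : Int) := by
  induction w using List.reverseRecOn with
  | nil => simp [pvMaskOf, pvNMask]
  | append_singleton w c ih =>
      rw [pvMaskOf_append, ih, pvBit_getD, pvNMask_append, PySem.Int.bor_natCast]

theorem pv_or_self_left (a b : Nat) : a ||| (a ||| b) = a ||| b := by
  rw [← Nat.or_assoc, Nat.or_self]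

theorem pvNMask_eq (w : List Char) :
    pvNMask w =
      (if 'a' ∈ w then 1 else 0) |||
        ((if 'e' ∈ w then 2 else 0) |||
          ((if 'i' ∈ w then 4 else 0) |||
            ((if 'o' ∈ w then 8 else 0) ||| (if 'u' ∈ w then 16 else 0)))) := by
  induction w using List.reverseRecOn with
  | nil => simp [pvNMask]
  | append_singleton w c ih =>
      rw [pvNMask_append, ih]
      by_cases hca : c = 'a'
      · subst hca
        by_cases ha : 'a' ∈ w <;>
          simp [ha, pvNBit, Nat.or_assoc, Nat.or_comm, Nat.or_left_comm, pv_or_self_left]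
      · by_cases hce : c = 'e'
        · subst hce
          by_cases he : 'e' ∈ w <;>
            simp [he, pvNBit, Nat.or_assoc, Nat.or_comm, Nat.or_left_comm, pv_or_self_left]
        · by_cases hci : c = 'i'
          · subst hci
            by_cases hi : 'i' ∈ w <;>
              simp [hi, pvNBit, Nat.or_assoc, Nat.or_comm, Nat.or_left_comm, pv_or_self_left]
          · by_cases hco : c = 'o'
            · subst hco
              by_cases ho : 'o' ∈ w <;>
                simp [ho, pvNBit, Nat.or_assoc, Nat.or_comm, Nat.or_left_comm, pv_or_self_left]
            · by_cases hcu : c = 'u'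
              · subst hcu
                by_cases hu : 'u' ∈ w <;>
                  simp [hu, pvNBit, Nat.or_assoc, Nat.or_comm, Nat.or_left_comm, pv_or_self_left]
              · simp [pvNBit, hca, hce, hci, hco, hcu, eq_comm]

theorem pvMaskOf_full_iff (w : List Char) :
    pvMaskOf w = 31 ↔ ('a' ∈ w ∧ 'e' ∈ w ∧ 'i' ∈ w ∧ 'o' ∈ w ∧ 'u' ∈ w) := by
  rw [pvMaskOf_eq_cast]
  have hcast : ((pvNMask w : Int) = 31) ↔ pvNMask w = 31 := by exact_mod_cast Iff.rfl
  rw [hcast, pvNMask_eq]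
  by_cases ha : 'a' ∈ w <;> by_cases he : 'e' ∈ w <;> by_cases hi : 'i' ∈ w <;>
    by_cases ho : 'o' ∈ w <;> by_cases hu : 'u' ∈ w <;>
    simp [ha, he, hi, ho, hu]

-- A's per-word test: the set of distinct vowels of a word has size 5 iff every vowel occurs.
theorem pvA_test_iff (w : List Char) :
    (PySem.Set.len (pvA_unique_vowels (String.ofList w)) = PySem.Str.len "aeiou")
      ↔ ('a' ∈ w ∧ 'e' ∈ w ∧ 'i' ∈ w ∧ 'o' ∈ w ∧ 'u' ∈ w) := by
  have hVn : ("aeiou".toList).Nodup := by decide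
  have hV5 : "aeiou".toList = ['a', 'e', 'i', 'o', 'u'] := by decide
  set V : List Char := "aeiou".toList with hV
  set S : List Char := PySem.Set.ofList (w.filter (fun c => V.contains c)) with hS
  have hmemS : ∀ x, x ∈ S ↔ (x ∈ w ∧ x ∈ V) := by
    intro x
    rw [hS, PySem.Set.mem_ofList, List.mem_filter]
    simp
  have hsub : S ⊆ V := fun x hx => ((hmemS x).1 hx).2
  have hSn : S.Nodup := PySem.Set.nodup_ofList _
  have hlen : PySem.Set.len (pvA_unique_vowels (String.ofList w)) = (S.length : Int) := by
    simp [PySem.Set.len, pvA_unique_vowels, hS, hV]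
  have hlenV : PySem.Str.len "aeiou" = (5 : Int) := by decide
  have hmain : S.length = 5 ↔ (∀ v ∈ V, v ∈ w) := by
    constructor
    · intro hlen5 v hv
      have hperm : S.Perm V := by
        have hsp : S.Subperm V := hSn.subperm hsub
        exact hsp.perm_of_length_le (by simp [hlen5]; decide)
      have : v ∈ S := hperm.symm.mem_iff.mp hv
      exact ((hmemS v).1 this).1
    · intro h
      have hsup : V ⊆ S := fun v hv => (hmemS v).2 ⟨h v hv, hv⟩
      have hperm : S.Perm V :=
        (List.perm_ext_iff_of_nodup hSn hVn).2 (fun x => ⟨fun hx => hsub hx, fun hx => hsup hx⟩)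
      rw [hperm.length_eq]; decide
  rw [hlen, hlenV]
  constructor
  · intro h
    have h5 : S.length = 5 := by exact_mod_cast h
    have hall := hmain.1 h5
    rw [hV5] at hall
    exact ⟨hall 'a' (by simp), hall 'e' (by simp), hall 'i' (by simp),
           hall 'o' (by simp), hall 'u' (by simp)⟩
  · intro ⟨h1, h2, h3, h4, h5⟩
    have hall : (∀ v ∈ V, v ∈ w) := by
      rw [hV5]
      intro v hv
      rcases hv with _ | ⟨_, _ | ⟨_, _ | ⟨_, _ | ⟨_, _ | ⟨_, hv⟩⟩⟩⟩⟩ <;> first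
        | exact h1 | exact h2 | exact h3 | exact h4 | exact h5 | cases hv
    rw [hmain.2 hall]; norm_num

-- split₀.go is accumulator-polymorphic
theorem pv_go_acc (cs : List Char) : ∀ (cur : List Char) (acc : List (List Char)),
    PySem.Chars.split₀.go cs cur acc = acc.reverse ++ PySem.Chars.split₀.go cs cur [] := by
  induction cs with
  | nil =>
      intro cur acc
      by_cases h : cur.isEmpty <;> simp [PySem.Chars.split₀.go, h]
  | cons c rest ih =>
      intro cur acc
      by_cases hs : PySem.Chars.isspace c
      · by_cases h : cur.isEmpty
        · simp only [PySem.Chars.split₀.go, hs, h, if_true]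
          rw [ih [] acc]
        · simp only [PySem.Chars.split₀.go, hs, h, if_true, Bool.false_eq_true, if_false]
          rw [ih [] (cur.reverse :: acc), ih [] [cur.reverse]]
          simp
      · simp only [PySem.Chars.split₀.go, hs, Bool.false_eq_true, if_false]
        rw [ih (c :: cur) acc]

-- the state machine computes the filtered split, for any starting word and result
theorem pvB_loop (cs : List Char) : ∀ (res : List String) (cur : List Char),
    pvBFin (cs.foldl pvBStep (res, cur, pvMaskOf cur))
      = res ++ ((PySem.Chars.split₀.go cs cur.reverse []).filter
          (fun w => decide (pvMaskOf w = 31))).map String.ofList := by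
  induction cs with
  | nil =>
      intro res cur
      rcases eq_or_ne cur [] with h | h
      · subst h
        simp [pvBFin, PySem.Chars.split₀.go, pvMaskOf]
      · have hne : cur.reverse.isEmpty = false := by simp [h]
        simp only [List.foldl_nil, pvBFin, PySem.Chars.split₀.go, hne, if_false, Bool.false_eq_true]
        by_cases hm : pvMaskOf cur = 31 <;> simp [hm]
  | cons c rest ih =>
      intro res cur
      by_cases hs : PySem.Chars.isspace c
      · have hstep : pvBStep (res, cur, pvMaskOf cur) c
            = ((if pvMaskOf cur = 31 then res ++ [String.ofList cur] else res), [], pvMaskOf []) := by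
          simp [pvBStep, hs, pvMaskOf]
        rcases eq_or_ne cur [] with h | h
        · subst h
          have h0 : ¬ pvMaskOf ([] : List Char) = 31 := by decide
          simp only [List.foldl_cons, hstep, if_neg h0]
          rw [ih]
          simp [PySem.Chars.split₀.go, hs]
        · have hne : cur.reverse.isEmpty = false := by simp [h]
          simp only [List.foldl_cons, hstep]
          rw [ih]
          have hgo : PySem.Chars.split₀.go (c :: rest) cur.reverse []
              = cur :: PySem.Chars.split₀.go rest [] [] := by
            simp only [PySem.Chars.split₀.go, hs, hne, if_true, if_false, Bool.false_eq_true]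
            rw [pv_go_acc]
            simp
          rw [hgo]
          by_cases hm : pvMaskOf cur = 31 <;> simp [hm]
      · have hstep : pvBStep (res, cur, pvMaskOf cur) c
            = (res, cur ++ [c], pvMaskOf (cur ++ [c])) := by
          simp [pvBStep, hs, pvMaskOf_append]
        simp only [List.foldl_cons, hstep]
        rw [ih]
        have hgo : PySem.Chars.split₀.go (c :: rest) cur.reverse []
            = PySem.Chars.split₀.go rest (cur ++ [c]).reverse [] := by
          simp [PySem.Chars.split₀.go, hs]
        rw [hgo]

-- A as a filter over split()
theorem pvA_eq_filter (text : String) :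
    get_words_with_all_vowels text
      = (PySem.Str.split₀ text).filter
          (fun word => decide (PySem.Set.len (pvA_unique_vowels word) = PySem.Str.len "aeiou")) := by
  unfold get_words_with_all_vowels
  have := PySem.List.foldl_append_if
    (p := fun word => decide (PySem.Set.len (pvA_unique_vowels word) = PySem.Str.len "aeiou"))
    (f := fun (w : String) => w) (l := PySem.Str.split₀ text) (acc := [])
  simpa [List.map_id] using this

-- ===== VERDICT (by name: the statement is the Claim_ definition above) =====
theorem get_words_with_all_vowels_spec : Claim_equal_get_words_with_all_vowels := by
  intro text _
  unfold Spec_get_words_with_all_vowels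
  rw [pvA_eq_filter]
  unfold get_words_with_all_vowels_alt
  have h0 : (([], [], (0 : Int)) : List String × List Char × Int) = ([], [], pvMaskOf []) := by
    simp [pvMaskOf]
  rw [h0, pvB_loop text.toList [] []]
  rw [show PySem.Chars.split₀.go text.toList ([] : List Char).reverse [] = PySem.Chars.split₀ text.toList from rfl]
  rw [PySem.Str.split₀, List.filter_map]
  simp only [List.nil_append]
  congr 1
  apply List.filter_congr
  intro w _
  simp only [Function.comp_apply, decide_eq_decide]
  exact (pvA_test_iff w).trans (pvMaskOf_full_iff w).symm
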